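-- pv_equiv track=rewrite | github.com/BuiCong1403/BuiCong1403 | bongda.py | pick_stream
-- ===== SOURCE A (Python) =====
-- def pick_stream(streams):
--     m3u8_hd = None
--     m3u8 = None
--
--     for s in streams:
--         name = s.get("name", "").upper()
--         url = s.get("sourceUrl")
--
--         if not url:
--             continue
--
--         if ".m3u8" in url:
--             if "FHD" in name or "HD" in name:
--                 m3u8_hd = url
--             else:
--                 m3u8 = url
--
--     return m3u8_hd or m3u8
-- ===== SOURCE B (Python) =====
-- def pick_stream(streams):
--     lst = list(streams)
--
--     def url_of(s):
--         return s.get("sourceUrl")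
--
--     def is_candidate(s):
--         url = url_of(s)
--         return bool(url) and ".m3u8" in url
--
--     def is_hd(s):
--         name = s.get("name", "").upper()
--         return "FHD" in name or "HD" in name
--
--     hd = next((url_of(s) for s in reversed(lst) if is_candidate(s) and is_hd(s)), None)
--     fb = next((url_of(s) for s in reversed(lst) if is_candidate(s) and not is_hd(s)), None)
--     return hd or fb
-- ===== Notes on version B (the rewrite author's own statement) =====
-- stated objective: idiomatic
-- what changed: Replaces the mutable two-accumulator forward loop by two early-stopping reverse searches (next over reversed(lst)), exploiting that last-wins overwrite equals first match from the end.
import Mathlib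
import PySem

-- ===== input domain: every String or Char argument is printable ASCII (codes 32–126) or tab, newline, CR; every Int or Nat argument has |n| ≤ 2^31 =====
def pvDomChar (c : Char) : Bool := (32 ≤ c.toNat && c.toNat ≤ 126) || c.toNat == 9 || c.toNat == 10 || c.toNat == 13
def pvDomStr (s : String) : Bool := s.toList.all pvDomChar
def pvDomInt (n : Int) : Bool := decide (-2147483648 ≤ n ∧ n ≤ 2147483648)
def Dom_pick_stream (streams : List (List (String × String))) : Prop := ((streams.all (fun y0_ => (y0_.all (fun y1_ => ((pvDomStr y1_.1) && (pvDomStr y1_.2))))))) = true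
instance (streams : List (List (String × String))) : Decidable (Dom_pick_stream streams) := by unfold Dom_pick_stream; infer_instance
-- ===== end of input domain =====

-- B replaces A's mutable two-accumulator forward loop by two early-stopping reverse searches (idiomatic; same cost).


-- ===== PORT A =====
-- one loop iteration of A: update the (m3u8_hd, m3u8) pair
def pickStep (acc : Option String × Option String) (s : List (String × String)) :
    Option String × Option String :=
  let name := PySem.Str.upper (PySem.Dict.getD (PySem.Dict.mk s) "name" "")
  match PySem.Dict.get? (PySem.Dict.mk s) "sourceUrl" with
  | none => acc                      -- url is None: 'not url' → continue
  | some u =>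
    if u = "" then acc               -- url is '': 'not url' → continue
    else if PySem.Str.isIn ".m3u8" u then
      if PySem.Str.isIn "FHD" name || PySem.Str.isIn "HD" name then (some u, acc.2)
      else (acc.1, some u)
    else acc

def pick_stream (streams : List (List (String × String))) : Option String :=
  let r := streams.foldl pickStep (none, none)
  match r.1 with                     -- 'm3u8_hd or m3u8' (Python truthiness)
  | some u => if u = "" then r.2 else some u
  | none => r.2

-- ===== PORT B =====
def urlOf (s : List (String × String)) : Option String :=
  PySem.Dict.get? (PySem.Dict.mk s) "sourceUrl"

def isCandidate (s : List (String × String)) : Bool :=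
  match urlOf s with
  | none => false
  | some u => (!(u = "")) && PySem.Str.isIn ".m3u8" u

def isHd (s : List (String × String)) : Bool :=
  let name := PySem.Str.upper (PySem.Dict.getD (PySem.Dict.mk s) "name" "")
  PySem.Str.isIn "FHD" name || PySem.Str.isIn "HD" name

-- next((url_of(s) for s in lst if p(s)), None)
def nextUrl (p : List (String × String) → Bool) (lst : List (List (String × String))) :
    Option String :=
  match lst.find? p with
  | some s => urlOf s
  | none => none

def pick_stream_alt (streams : List (List (String × String))) : Option String :=
  let lst := streams
  let hd := nextUrl (fun s => isCandidate s && isHd s) lst.reverse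
  let fb := nextUrl (fun s => isCandidate s && !isHd s) lst.reverse
  match hd with                      -- 'hd or fb'
  | some u => if u = "" then fb else some u
  | none => fb

-- ===== PRECONDITION & SPEC =====
def Spec_pick_stream (streams : List (List (String × String))) (out : Option String) : Prop := out = pick_stream_alt streams
instance (streams : List (List (String × String))) (out : Option String) : Decidable (Spec_pick_stream streams out) := by unfold Spec_pick_stream; infer_instance

-- ===== CLAIM (what is proved, stated in full; the proofs are below) =====
def Claim_equal_pick_stream : Prop := ∀ (streams : List (List (String × String))), Dom_pick_stream streams → Spec_pick_stream streams (pick_stream streams)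

-- ===== LEMMAS AND PROOFS =====

-- one step of A's fold, phrased with B's predicates
theorem pickStep_eq (a b : Option String) (x : List (String × String)) :
    pickStep (a, b) x =
      ((if isCandidate x && isHd x then urlOf x else a),
       (if isCandidate x && !isHd x then urlOf x else b)) := by
  unfold pickStep isCandidate isHd urlOf
  cases h : PySem.Dict.get? (PySem.Dict.mk x) "sourceUrl" with
  | none => simp
  | some u =>
    by_cases hu : u = "" <;> simp [hu] <;> split_ifs <;> simp_all

-- A's fold computes, in each component, the first match from the end (B's reverse search)
theorem fold_eq (ss : List (List (String × String))) (a b : Option String) :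
    ss.foldl pickStep (a, b) =
      ((match ss.reverse.find? (fun s => isCandidate s && isHd s) with
        | some s => urlOf s | none => a),
       (match ss.reverse.find? (fun s => isCandidate s && !isHd s) with
        | some s => urlOf s | none => b)) := by
  induction ss generalizing a b with
  | nil => simp
  | cons x xs ih =>
    simp only [List.foldl_cons, pickStep_eq, ih, List.reverse_cons, List.find?_append]
    cases h1 : xs.reverse.find? (fun s => isCandidate s && isHd s) <;>
    cases h2 : xs.reverse.find? (fun s => isCandidate s && !isHd s) <;>
      simp [List.find?] <;>
        cases hc : (isCandidate x && isHd x) <;>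
        cases hf : (isCandidate x && !isHd x) <;> simp_all

-- ===== VERDICT (by name: the statement is the Claim_ definition above) =====
theorem pick_stream_spec : Claim_equal_pick_stream := by
  intro streams _
  unfold Spec_pick_stream pick_stream pick_stream_alt nextUrl
  rw [fold_eq]
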